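-- pv_equiv track=rewrite | github.com/todtk/Netology.Course-Full-stack-Python-developer- | advance/06.tests/task_1/basic_hw4_task_3.py | words_counter
-- ===== SOURCE A (Python) =====
-- def words_counter(queries : list) -> dict:
--
--     counter = {}
--
--     for querie in queries:
--         querie_splited = querie.split(" ")
--
--         count_words = len(querie_splited)
--
--         if counter.get(count_words) is None:
--             counter[count_words] = 1
--         else:
--             counter[count_words] = counter[count_words] + 1
--
--     return counter
-- ===== SOURCE B (Python) =====
-- def words_counter(queries : list) -> dict:
--     lengths = [len(q.split(" ")) for q in queries]
--     keys = list(dict.fromkeys(lengths))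
--     return {k: lengths.count(k) for k in keys}
-- ===== Notes on version B (the rewrite author's own statement) =====
-- stated objective: alternative
-- what changed: B replaces A's incremental dict accumulation by a two-pass scheme: build the list of word counts, take its first-occurrence dedup as the key order, and compute each value with list.count.
import Mathlib
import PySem

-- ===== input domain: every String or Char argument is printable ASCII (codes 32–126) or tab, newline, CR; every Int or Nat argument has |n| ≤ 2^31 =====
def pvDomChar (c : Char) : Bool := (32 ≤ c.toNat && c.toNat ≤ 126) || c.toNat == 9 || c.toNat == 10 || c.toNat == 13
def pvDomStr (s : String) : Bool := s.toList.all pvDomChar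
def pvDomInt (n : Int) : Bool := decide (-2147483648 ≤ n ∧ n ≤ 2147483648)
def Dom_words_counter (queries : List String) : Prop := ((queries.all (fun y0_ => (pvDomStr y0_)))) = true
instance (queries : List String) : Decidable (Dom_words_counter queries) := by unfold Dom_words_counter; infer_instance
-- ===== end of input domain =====

-- ===== PORT A =====
-- B: two-pass re-implementation (dedup of word counts, values via list.count) instead of A's incremental dict accumulation; same cost class, equal output.
def words_counter (queries : List String) : List (Int × Int) :=
  (queries.foldl (fun counter q =>
      let count_words : Int := ((PySem.Chars.splitOn q.toList [' ']).length : Int)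
      match counter.get? count_words with
      | none => counter.insert count_words 1
      | some v => counter.insert count_words (v + 1))
    PySem.Dict.empty).items

-- ===== PORT B =====
def words_counter_alt (queries : List String) : List (Int × Int) :=
  let lengths : List Int := queries.map (fun q => ((PySem.Chars.splitOn q.toList [' ']).length : Int))
  (PySem.List.dedup lengths).map (fun k => (k, (lengths.count k : Int)))

-- ===== PRECONDITION & SPEC =====
def Spec_words_counter (queries : List String) (out : List (Int × Int)) : Prop := out = words_counter_alt queries
instance (queries : List String) (out : List (Int × Int)) : Decidable (Spec_words_counter queries out) := by unfold Spec_words_counter; infer_instance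

-- ===== CLAIM (what is proved, stated in full; the proofs are below) =====
def Claim_equal_words_counter : Prop := ∀ (queries : List String), Dom_words_counter queries → Spec_words_counter queries (words_counter queries)

-- ===== LEMMAS AND PROOFS =====

-- A's loop body, seen through the counter: each step is 'insert k (getD k 0 + 1)'.
theorem words_counter_fold_eq (queries : List String) :
    words_counter queries
      = ((queries.map (fun q => ((PySem.Chars.splitOn q.toList [' ']).length : Int))).foldl
          (fun d x => d.insert x (d.getD x 0 + 1)) PySem.Dict.empty).items := by
  unfold words_counter
  rw [List.foldl_map]
  congr 1
  apply PySem.List.foldl_congr_mem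
  intro d q _
  simp only []
  cases h : d.get? ((PySem.Chars.splitOn q.toList [' ']).length : Int) with
  | none => simp [PySem.Dict.getD, h]
  | some v => simp [PySem.Dict.getD, h]

-- ===== VERDICT (by name: the statement is the Claim_ definition above) =====
theorem words_counter_spec : Claim_equal_words_counter := by
  intro queries _
  unfold Spec_words_counter words_counter_alt
  rw [words_counter_fold_eq, PySem.Dict.foldl_insert_getD_add_one_eq_counter,
    PySem.Dict.items_counter]
  simp
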